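-- pv_equiv track=rewrite | github.com/primalrun/hilton_work | data_profile/data_profile_combine_profile_results.py | get_value_with_max_octet_length
-- ===== SOURCE A (Python) =====
-- def get_value_with_max_octet_length(value_list):
--     string_list = [elem for elem in value_list if isinstance(elem, str)]
--     no_null_list = [x for x in string_list if x != '']
--     octet_list = [len(x.encode('utf-8')) for x in no_null_list]
--     if len(octet_list) > 0 and len(no_null_list) > 0:
--         highest_octet_len = max(octet_list)
--         highest_octet_index = octet_list.index(highest_octet_len)
--         highest_octet_string = no_null_list[highest_octet_index]
--         return highest_octet_string
--     else:
--         return None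
-- ===== SOURCE B (Python) =====
-- def get_value_with_max_octet_length(value_list):
--     best = None
--     best_len = -1
--     for elem in value_list:
--         if not isinstance(elem, str) or elem == '':
--             continue
--         octet_len = len(elem.encode('utf-8'))
--         if octet_len > best_len:
--             best = elem
--             best_len = octet_len
--     return best
-- ===== Notes on version B (the rewrite author's own statement) =====
-- stated objective: simpler
-- what changed: Replaces the three intermediate list comprehensions plus max()/.index()/subscript round-trip with one pass keeping the current best string and its byte length (strict > keeps the first maximal string, as max+index does).
import Mathlib
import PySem

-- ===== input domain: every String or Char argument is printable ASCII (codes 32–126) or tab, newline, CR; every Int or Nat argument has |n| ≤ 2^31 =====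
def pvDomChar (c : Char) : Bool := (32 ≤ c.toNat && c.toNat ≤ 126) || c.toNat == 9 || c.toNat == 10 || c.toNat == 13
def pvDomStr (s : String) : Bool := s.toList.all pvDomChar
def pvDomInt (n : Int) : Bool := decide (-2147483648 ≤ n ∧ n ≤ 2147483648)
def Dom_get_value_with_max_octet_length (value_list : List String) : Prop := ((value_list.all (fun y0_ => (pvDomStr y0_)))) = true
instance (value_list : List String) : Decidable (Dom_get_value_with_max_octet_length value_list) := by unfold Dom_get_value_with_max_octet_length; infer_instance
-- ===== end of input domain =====

-- B replaces A's three intermediate lists and the max()/.index()/subscript round-trip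
-- with a single pass keeping the best string and its byte length (objective: simpler).


-- len(x.encode('utf-8')) : exact UTF-8 byte count of a string
def pyOctetLen (s : String) : Int := (s.toList.foldl (fun n c => n + c.utf8Size) 0 : Nat)

-- ===== PORT A =====
def get_value_with_max_octet_length (value_list : List String) : Option String :=
  let string_list := value_list   -- every element is a str under the type convention
  let no_null_list := string_list.filter (fun x => x ≠ "")
  let octet_list := no_null_list.map (fun x => pyOctetLen x)
  if octet_list.length > 0 ∧ no_null_list.length > 0 then
    match PySem.List.max? octet_list (fun y => y) with
    | some highest_octet_len =>
      match PySem.List.index? octet_list highest_octet_len with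
      | some highest_octet_index => PySem.List.pyGet? no_null_list (highest_octet_index : Int)
      | none => none   -- unreachable: the max is a member
    | none => none     -- unreachable: octet_list is nonempty here
  else none

-- ===== PORT B =====
def pyBestStep (acc : Option String × Int) (elem : String) : Option String × Int :=
  if elem = "" then acc
  else
    let octet_len := pyOctetLen elem
    if octet_len > acc.2 then (some elem, octet_len) else acc

def get_value_with_max_octet_length_alt (value_list : List String) : Option String :=
  (value_list.foldl pyBestStep (none, -1)).1

-- ===== PRECONDITION & SPEC =====
def Spec_get_value_with_max_octet_length (value_list : List String) (out : Option String) : Prop := out = get_value_with_max_octet_length_alt value_list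
instance (value_list : List String) (out : Option String) : Decidable (Spec_get_value_with_max_octet_length value_list out) := by unfold Spec_get_value_with_max_octet_length; infer_instance

-- ===== CLAIM (what is proved, stated in full; the proofs are below) =====
def Claim_equal_get_value_with_max_octet_length : Prop := ∀ (value_list : List String), Dom_get_value_with_max_octet_length value_list → Spec_get_value_with_max_octet_length value_list (get_value_with_max_octet_length value_list)

-- ===== LEMMAS AND PROOFS =====

-- c is the first string of maximal octet length in f
def FirstMax (f : List String) (c : String) : Prop :=
  ∃ k, k < f.length ∧ f.getD k "" = c ∧
    (∀ i, i < f.length → pyOctetLen (f.getD i "") ≤ pyOctetLen c) ∧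
    (∀ j, j < k → pyOctetLen (f.getD j "") < pyOctetLen c)

theorem FirstMax_unique {f : List String} {c₁ c₂ : String}
    (h₁ : FirstMax f c₁) (h₂ : FirstMax f c₂) : c₁ = c₂ := by
  obtain ⟨k₁, hk₁, he₁, hmax₁, hst₁⟩ := h₁
  obtain ⟨k₂, hk₂, he₂, hmax₂, hst₂⟩ := h₂
  rcases Nat.lt_trichotomy k₁ k₂ with h | h | h
  · have a := hst₂ k₁ h
    have b := hmax₁ k₂ hk₂
    rw [he₁] at a; rw [he₂] at b; omega
  · rw [← he₁, ← he₂, h]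
  · have a := hst₁ k₂ h
    have b := hmax₂ k₁ hk₁
    rw [he₂] at a; rw [he₁] at b; omega

theorem octetLen_nonneg (s : String) : 0 ≤ pyOctetLen s := by
  simp [pyOctetLen]

-- the A side returns the first maximal string of the filtered list
theorem portA_core (f : List String) (hne : f ≠ []) :
    ∃ c, (if (f.map (fun x => pyOctetLen x)).length > 0 ∧ f.length > 0 then
        match PySem.List.max? (f.map (fun x => pyOctetLen x)) (fun y => y) with
        | some highest_octet_len =>
          match PySem.List.index? (f.map (fun x => pyOctetLen x)) highest_octet_len with
          | some highest_octet_index => PySem.List.pyGet? f (highest_octet_index : Int)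
          | none => none
        | none => none
      else none) = some c ∧ FirstMax f c := by
  have hfne : 0 < f.length := List.length_pos_iff.mpr hne
  have hcond : (f.map (fun x => pyOctetLen x)).length > 0 ∧ f.length > 0 := by
    simp; omega
  rw [if_pos hcond]
  rcases hm : PySem.List.max? (f.map (fun x => pyOctetLen x)) (fun y => y) with _ | m
  · rw [PySem.List.max?_eq_none_iff, List.map_eq_nil_iff] at hm
    exact absurd hm hne
  · have hmem : m ∈ f.map (fun x => pyOctetLen x) := PySem.List.max?_mem hm
    rcases hi : PySem.List.index? (f.map (fun x => pyOctetLen x)) m with _ | k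
    · have := (PySem.List.index?_isSome_iff (f.map (fun x => pyOctetLen x)) m).mpr hmem
      rw [hi] at this; simp at this
    · obtain ⟨hk, hkm, hbef⟩ := PySem.List.getElem_of_index?_eq_some hi
      have hkf : k < f.length := by simpa using hk
      refine ⟨f[k], ?_, ?_⟩
      · simp only [hi]
        rw [PySem.List.pyGet?_natCast]
        exact List.getElem?_eq_getElem hkf
      · have hck : pyOctetLen f[k] = m := by
          rw [← hkm]; simp
        refine ⟨k, hkf, List.getD_eq_getElem f "" hkf, ?_, ?_⟩
        · intro i hi2
          rw [List.getD_eq_getElem f "" hi2, hck]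
          exact PySem.List.max?_isMax hm _ (List.mem_map_of_mem (List.getElem_mem hi2))
        · intro j hj
          have hjf : j < f.length := by omega
          have hne2 := hbef j hj
          have hle := PySem.List.max?_isMax hm ((f.map (fun x => pyOctetLen x))[j]'(by simpa using hjf))
            (List.getElem_mem (by simpa using hjf))
          simp at hne2 hle
          rw [List.getD_eq_getElem f "" hjf, hck]
          omega

theorem portA_firstMax (value_list : List String)
    (hne : value_list.filter (fun x => x ≠ "") ≠ []) :
    ∃ c, get_value_with_max_octet_length value_list = some c ∧
      FirstMax (value_list.filter (fun x => x ≠ "")) c := by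
  exact portA_core _ hne

-- the B side fold over a list, started from a real candidate, yields the first maximal string
theorem foldB_firstMax (f : List String) (b : String) :
    ∃ c, f.foldl (fun acc s =>
        if pyOctetLen s > acc.2 then (some s, pyOctetLen s) else acc)
        (some b, pyOctetLen b) = (some c, pyOctetLen c) ∧ FirstMax (b :: f) c := by
  induction f generalizing b with
  | nil =>
    refine ⟨b, rfl, 0, by simp, rfl, ?_, by omega⟩
    intro i hi
    simp at hi
    subst hi
    simp
  | cons x t ih =>
    by_cases h : pyOctetLen x > pyOctetLen b
    · obtain ⟨c, hc, k, hk, he, hmax, hst⟩ := ih x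
      rw [List.foldl_cons, if_pos h]
      refine ⟨c, hc, k + 1, by simpa using hk, by simpa using he, ?_, ?_⟩
      · intro i hi
        match i with
        | 0 =>
          have := hmax 0 (by simp)
          simp at this ⊢; omega
        | n + 1 =>
          have := hmax n (by simp at hi ⊢; omega)
          simpa using this
      · intro j hj
        match j with
        | 0 =>
          have := hmax 0 (by simp)
          simp at this ⊢; omega
        | n + 1 =>
          have := hst n (by omega)
          simpa using this
    · obtain ⟨c, hc, k, hk, he, hmax, hst⟩ := ih b
      rw [List.foldl_cons, if_neg h]
      refine ⟨c, hc, ?_⟩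
      match k with
      | 0 =>
        simp at he
        refine ⟨0, by simp, by simpa using he, ?_, by omega⟩
        intro i hi
        match i with
        | 0 => simp [he]
        | 1 =>
          have := hmax 0 (by simp)
          simp at this ⊢; omega
        | n + 2 =>
          have := hmax (n + 1) (by simp at hi ⊢; omega)
          simpa using this
      | m + 1 =>
        refine ⟨m + 2, by simp at hk ⊢; omega, by simpa using he, ?_, ?_⟩
        · intro i hi
          match i with
          | 0 =>
            have := hmax 0 (by simp)
            simpa using this
          | 1 =>
            have := hmax 0 (by simp)
            simp at this ⊢; omega
          | n + 2 =>
            have := hmax (n + 1) (by simp at hi ⊢; omega)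
            simpa using this
        · intro j hj
          match j with
          | 0 =>
            have := hst 0 (by omega)
            simpa using this
          | 1 =>
            have := hst 0 (by omega)
            simp at this ⊢; omega
          | n + 2 =>
            have := hst (n + 1) (by omega)
            simpa using this

-- B's fold skips empty strings: it equals the simpler fold over the filtered list
theorem foldB_filter (l : List String) (acc : Option String × Int) :
    l.foldl pyBestStep acc =
      (l.filter (fun x => x ≠ "")).foldl (fun acc s =>
        if pyOctetLen s > acc.2 then (some s, pyOctetLen s) else acc) acc := by
  induction l generalizing acc with
  | nil => rfl
  | cons x t ih =>
    by_cases hx : x = "" <;> simp [pyBestStep, hx, ih]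

-- ===== VERDICT (by name: the statement is the Claim_ definition above) =====
theorem get_value_with_max_octet_length_spec : Claim_equal_get_value_with_max_octet_length := by
  intro value_list _
  unfold Spec_get_value_with_max_octet_length
  unfold get_value_with_max_octet_length_alt
  rw [foldB_filter]
  rcases hf : value_list.filter (fun x => x ≠ "") with _ | ⟨x, rest⟩
  · simp only [get_value_with_max_octet_length]
    rw [hf]
    simp
  · obtain ⟨c, hA, hFA⟩ := portA_firstMax value_list (by rw [hf]; simp)
    obtain ⟨c', hB, hFB⟩ := foldB_firstMax rest x
    have step1 : (if pyOctetLen x > (-1 : Int) then (some x, pyOctetLen x)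
        else ((none, -1) : Option String × Int)) = (some x, pyOctetLen x) := by
      have := octetLen_nonneg x
      simp; omega
    rw [hf] at hFA
    rw [hA, List.foldl_cons, step1, hB, FirstMax_unique hFA hFB]
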